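-- pv_equiv track=rewrite | github.com/embydextrous/Interview | matrix/56-sizeOfLargestPlusSign.py | createBottom
-- ===== SOURCE A (Python) =====
-- def createBottom(M, R, C):
--     bottom = [[0 for i in range(C)] for j in range(R)]
--     for i in range(R-2, -1, -1):
--         for j in range(C):
--             if M[i+1][j] == 0:
--                 bottom[i][j] = 0
--             else:
--                 bottom[i][j] = bottom[i+1][j] + 1
--     return bottom
-- ===== SOURCE B (Python) =====
-- def createBottom(M, R, C):
--     # Column-outer sweep: per column maintain a scalar run counter of consecutive
--     # nonzero cells below, store columns, then assemble the rows from the columns.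
--     if R <= 0:
--         return []
--     cols = []
--     for j in range(C):
--         col = [0] * R
--         run = 0
--         for i in range(R - 1, 0, -1):
--             run = run + 1 if M[i][j] != 0 else 0
--             col[i - 1] = run
--         cols.append(col)
--     return [[cols[j][i] for j in range(C)] for i in range(R)]
-- ===== Notes on version B (the rewrite author's own statement) =====
-- stated objective: alternative
-- what changed: Replaces the row-by-row DP grid that reads its own row i+1 (bottom[i+1][j]) by a column-outer sweep: for each column a scalar run counter of consecutive nonzero cells below is threaded upward into a column list, and the rows are assembled from the columns at the end; the output grid is never read during the computation.
import Mathlib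
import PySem

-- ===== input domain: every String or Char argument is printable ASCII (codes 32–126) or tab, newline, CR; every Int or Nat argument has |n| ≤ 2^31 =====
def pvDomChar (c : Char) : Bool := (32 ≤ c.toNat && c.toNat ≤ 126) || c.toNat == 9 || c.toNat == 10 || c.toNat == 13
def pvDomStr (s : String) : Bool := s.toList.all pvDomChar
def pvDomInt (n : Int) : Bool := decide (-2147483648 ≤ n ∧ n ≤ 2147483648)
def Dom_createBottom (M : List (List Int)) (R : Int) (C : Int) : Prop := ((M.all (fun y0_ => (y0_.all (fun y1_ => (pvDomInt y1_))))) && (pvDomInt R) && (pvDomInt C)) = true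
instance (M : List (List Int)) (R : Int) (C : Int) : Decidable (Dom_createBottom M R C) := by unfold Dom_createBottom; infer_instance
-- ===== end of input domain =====

-- B replaces A's row-by-row DP grid that reads its own row i+1 by a column-outer
-- sweep threading a scalar run counter per column, assembling rows from columns at the end.

-- ===== PORT A =====
def createBottom (M : List (List Int)) (R : Int) (C : Int) : List (List Int) :=
  let bottom := (PySem.List.pyRange 0 R 1).map (fun _ =>
    (PySem.List.pyRange 0 C 1).map (fun _ => (0 : Int)))
  (PySem.List.pyRange (R - 2) (-1) (-1)).foldl (fun bottom i =>
    (PySem.List.pyRange 0 C 1).foldl (fun bottom j =>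
      let v : Int :=
        if PySem.List.pyGetD (PySem.List.pyGetD M (i + 1) []) j 0 = 0 then 0
        else PySem.List.pyGetD (PySem.List.pyGetD bottom (i + 1) []) j 0 + 1
      PySem.List.pySetD bottom i (PySem.List.pySetD (PySem.List.pyGetD bottom i []) j v))
      bottom) bottom

-- ===== PORT B =====
def createBottom_alt (M : List (List Int)) (R : Int) (C : Int) : List (List Int) :=
  if R ≤ 0 then []
  else
  let cols := (PySem.List.pyRange 0 C 1).map (fun j =>
    ((PySem.List.pyRange (R - 1) 0 (-1)).foldl
      (fun (st : List Int × Int) i =>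
        let run : Int :=
          if PySem.List.pyGetD (PySem.List.pyGetD M i []) j 0 ≠ 0 then st.2 + 1 else 0
        (PySem.List.pySetD st.1 (i - 1) run, run))
      (List.replicate R.toNat (0 : Int), 0)).1)
  (PySem.List.pyRange 0 R 1).map (fun i =>
    (PySem.List.pyRange 0 C 1).map (fun j =>
      PySem.List.pyGetD (PySem.List.pyGetD cols j []) i 0))

-- ===== PRECONDITION & SPEC =====
-- Pre_ = exactly the inputs where Python A returns: when R ≥ 2 and C ≥ 1 it reads M[i+1][j]
-- for 1 ≤ i+1 ≤ R-1, 0 ≤ j < C, so rows 1..R-1 must exist and have length ≥ C (else IndexError).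
def Pre_createBottom (M : List (List Int)) (R : Int) (C : Int) : Prop :=
  (2 ≤ R ∧ 1 ≤ C) → (R ≤ (M.length : Int) ∧ ∀ row ∈ (M.take R.toNat).drop 1, C ≤ (row.length : Int))
instance (M : List (List Int)) (R : Int) (C : Int) : Decidable (Pre_createBottom M R C) := by
  unfold Pre_createBottom; infer_instance

def pvWitness_createBottom : List (List Int) × Int × Int := ([[1, 0], [0, 2], [5, 0]], 3, 2)

def Spec_createBottom (M : List (List Int)) (R : Int) (C : Int) (out : List (List Int)) : Prop := out = createBottom_alt M R C
instance (M : List (List Int)) (R : Int) (C : Int) (out : List (List Int)) : Decidable (Spec_createBottom M R C out) := by unfold Spec_createBottom; infer_instance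

-- ===== CLAIM (what is proved, stated in full; the proofs are below) =====
def Claim_equal_createBottom : Prop := ∀ (M : List (List Int)) (R : Int) (C : Int), Dom_createBottom M R C → Pre_createBottom M R C → Spec_createBottom M R C (createBottom M R C)

-- ===== LEMMAS AND PROOFS =====

-- the row both programs compute from the row above (prev) and the matrix row M[i+1] (mrow)
def pvRow (mrow prev : List Int) (C : Int) : List Int :=
  (PySem.List.pyRange 0 C 1).map (fun j =>
    if PySem.List.pyGetD mrow j 0 = 0 then 0 else PySem.List.pyGetD prev j 0 + 1)

-- the value of cell (row R-1-k, column j): k = number of rows below it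
def pvVal (M : List (List Int)) (R : Int) (j : Int) : Nat → Int
  | 0 => 0
  | k + 1 =>
    if PySem.List.pyGetD (PySem.List.pyGetD M (R - 1 - (k : Int)) []) j 0 = 0 then 0
    else pvVal M R j k + 1

-- the row at index R-1-k
def pvRowF (M : List (List Int)) (C R : Int) : Nat → List Int
  | 0 => List.replicate C.toNat 0
  | k + 1 => pvRow (PySem.List.pyGetD M (R - 1 - (k : Int)) []) (pvRowF M C R k) C

lemma rowF_eq (M : List (List Int)) (C R : Int) (k : Nat) :
    pvRowF M C R k = (PySem.List.pyRange 0 C 1).map (fun j => pvVal M R j k) := by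
  induction k with
  | zero =>
    simp only [pvRowF, pvVal]
    rw [List.map_const']
    simp [PySem.List.length_pyRange_one]
  | succ k ih =>
    simp only [pvRowF, pvRow, ih, pvVal]
    apply List.map_congr_left
    intro j hj
    obtain ⟨hj0, hjC⟩ := (PySem.List.mem_pyRange_one).mp hj
    rw [PySem.List.pyGetD_map_pyRange_of_nonneg _ _ _ _ hj0 hjC]

-- writing positions 0..n-1 of a list of length ≥ n realises the map
lemma setRow_nat (f : Int → Int) : ∀ (n : Nat) (r : List Int), n ≤ r.length →
    (PySem.List.pyRange 0 (n : Int) 1).foldl (fun r j => PySem.List.pySetD r j (f j)) r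
      = (PySem.List.pyRange 0 (n : Int) 1).map f ++ r.drop n := by
  intro n
  induction n with
  | zero => intro r _; simp [PySem.List.pyRange_one_eq_nil]
  | succ n ih =>
    intro r hr
    have h1 : ((n : Int) + 1) = ((n + 1 : Nat) : Int) := by push_cast; ring
    rw [← h1, PySem.List.pyRange_one_succ_right (by omega), List.foldl_append,
      ih r (by omega), List.map_append]
    have hn : n < r.length := by omega
    have hdrop : r.drop n = r[n] :: r.drop (n + 1) := List.drop_eq_getElem_cons hn
    simp only [List.foldl_cons, List.foldl_nil, PySem.List.pySetD_natCast, List.map_cons,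
      List.map_nil]
    have hlen' : ((PySem.List.pyRange 0 (n : Int) 1).map f).length = n := by
      simp [PySem.List.length_pyRange_one]
    rw [List.set_append_right _ _ (by omega), hlen', Nat.sub_self, hdrop, List.set_cons_zero]
    simp

lemma setRow (f : Int → Int) (C : Int) (r : List Int) (hr : r.length = C.toNat) :
    (PySem.List.pyRange 0 C 1).foldl (fun r j => PySem.List.pySetD r j (f j)) r
      = (PySem.List.pyRange 0 C 1).map f := by
  by_cases hC : C ≤ 0
  · have h0 : r = [] := List.length_eq_zero_iff.mp (by omega)
    simp [PySem.List.pyRange_one_eq_nil (by omega : C ≤ 0), h0]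
  · have := setRow_nat f C.toNat r (by omega)
    have hCC : ((C.toNat : Nat) : Int) = C := by omega
    rw [hCC] at this
    rw [this, show C.toNat = r.length from hr.symm, List.drop_length, List.append_nil]

-- the inner j-loop of A only writes row i and reads rows i and i+1, so it factors
-- through a single row update
lemma inner_eq (g : List Int → Int → Int) (i : Int) (hi : 0 ≤ i) :
    ∀ (L : List Int) (b : List (List Int)), i.toNat < b.length →
    L.foldl (fun b j =>
        PySem.List.pySetD b i (PySem.List.pySetD (PySem.List.pyGetD b i []) j
          (g (PySem.List.pyGetD b (i + 1) []) j))) b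
      = PySem.List.pySetD b i
          (L.foldl (fun r j => PySem.List.pySetD r j (g (PySem.List.pyGetD b (i + 1) []) j))
            (PySem.List.pyGetD b i [])) := by
  intro L
  induction L with
  | nil =>
    intro b hb
    simp only [List.foldl_nil]
    rw [PySem.List.pySetD_of_nonneg _ _ hi, PySem.List.pyGetD_of_nonneg _ _ hi]
    simp [List.getD, List.getElem?_eq_getElem hb, List.set_getElem_self]
  | cons j L ih =>
    intro b hb
    simp only [List.foldl_cons]
    set r₁ := PySem.List.pySetD (PySem.List.pyGetD b i []) j
      (g (PySem.List.pyGetD b (i + 1) []) j) with hr₁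
    have hlen : (PySem.List.pySetD b i r₁).length = b.length := PySem.List.length_pySetD ..
    rw [ih (PySem.List.pySetD b i r₁) (by omega)]
    have e1 : PySem.List.pyGetD (PySem.List.pySetD b i r₁) (i + 1) []
        = PySem.List.pyGetD b (i + 1) [] := by
      rw [PySem.List.pySetD_of_nonneg _ _ hi, PySem.List.pyGetD_of_nonneg _ _ (by omega),
        PySem.List.pyGetD_of_nonneg _ _ (by omega : (0 : Int) ≤ i + 1)]
      simp [List.getD, List.getElem?_set_ne (by omega : i.toNat ≠ (i + 1).toNat)]
    have e2 : PySem.List.pyGetD (PySem.List.pySetD b i r₁) i [] = r₁ := by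
      rw [PySem.List.pySetD_of_nonneg _ _ hi, PySem.List.pyGetD_of_nonneg _ _ hi]
      simp [List.getD, List.getElem?_set_self (by omega : i.toNat < b.length)]
    have e3 : ∀ X, PySem.List.pySetD (PySem.List.pySetD b i r₁) i X
        = PySem.List.pySetD b i X := by
      intro X
      rw [PySem.List.pySetD_of_nonneg _ _ hi, PySem.List.pySetD_of_nonneg _ _ hi,
        PySem.List.pySetD_of_nonneg _ _ hi, List.set_set]
    rw [e1, e2, e3]

-- one outer step of A: row i is overwritten with pvRow(M[i+1], bottom[i+1])
lemma astep_eq (M : List (List Int)) (C : Int) (b : List (List Int)) (i : Int)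
    (hi : 0 ≤ i) (hb : i.toNat < b.length) (hrow : (PySem.List.pyGetD b i []).length = C.toNat) :
    (PySem.List.pyRange 0 C 1).foldl (fun bottom j =>
        PySem.List.pySetD bottom i (PySem.List.pySetD (PySem.List.pyGetD bottom i []) j
          (if PySem.List.pyGetD (PySem.List.pyGetD M (i + 1) []) j 0 = 0 then 0
           else PySem.List.pyGetD (PySem.List.pyGetD bottom (i + 1) []) j 0 + 1))) b
      = PySem.List.pySetD b i
          (pvRow (PySem.List.pyGetD M (i + 1) []) (PySem.List.pyGetD b (i + 1) []) C) := by
  rw [inner_eq (fun prev j => if PySem.List.pyGetD (PySem.List.pyGetD M (i + 1) []) j 0 = 0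
        then 0 else PySem.List.pyGetD prev j 0 + 1) i hi (PySem.List.pyRange 0 C 1) b hb,
    setRow _ C _ hrow]
  rfl

-- A's outer loop: the grid, with rows below index k already holding pvRowF values,
-- becomes the full pvRowF matrix
lemma loop_A (M : List (List Int)) (C R : Int) :
    ∀ (k : Nat), (k : Int) ≤ R - 1 →
    (PySem.List.pyRange ((k : Int) - 1) (-1) (-1)).foldl (fun bottom i =>
        (PySem.List.pyRange 0 C 1).foldl (fun bottom j =>
          PySem.List.pySetD bottom i (PySem.List.pySetD (PySem.List.pyGetD bottom i []) j
            (if PySem.List.pyGetD (PySem.List.pyGetD M (i + 1) []) j 0 = 0 then 0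
             else PySem.List.pyGetD (PySem.List.pyGetD bottom (i + 1) []) j 0 + 1))) bottom)
      (List.replicate k (List.replicate C.toNat (0 : Int))
        ++ (List.range (R.toNat - k)).map (fun t => pvRowF M C R (R.toNat - 1 - k - t)))
      = (List.range R.toNat).map (fun t => pvRowF M C R (R.toNat - 1 - t)) := by
  intro k
  induction k with
  | zero =>
    intro hk
    rw [show ((0 : Nat) : Int) - 1 = -1 by norm_num,
      PySem.List.pyRange_neg_one_eq_nil le_rfl]
    simp
  | succ k ih =>
    intro hk
    have hR : k + 2 ≤ R.toNat := by omega
    have hcast : ((k + 1 : Nat) : Int) - 1 = (k : Int) := by push_cast; ring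
    rw [hcast, PySem.List.pyRange_neg_one_cons (by omega : (-1 : Int) < (k : Int)),
      List.foldl_cons]
    set n := R.toNat - (k + 1) with hn
    set z := List.replicate C.toNat (0 : Int) with hz
    have hS : (List.range n).map (fun t => pvRowF M C R (R.toNat - 1 - (k + 1) - t))
        = pvRowF M C R (R.toNat - 2 - k)
          :: (List.range (n - 1)).map (fun t => pvRowF M C R (R.toNat - 2 - k - (t + 1))) := by
      rw [show n = (n - 1) + 1 by omega, List.range_succ_eq_map, List.map_cons, List.map_map]
      rw [show R.toNat - 1 - (k + 1) - 0 = R.toNat - 2 - k by omega]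
      congr 1
      · apply List.map_congr_left
        intro t _
        simp only [Function.comp]
        rw [show R.toNat - 1 - (k + 1) - Nat.succ t = R.toNat - 2 - k - (t + 1) by omega]
    set S' := (List.range (n - 1)).map (fun t => pvRowF M C R (R.toNat - 2 - k - (t + 1)))
      with hS'
    rw [hS]
    set b := List.replicate (k + 1) z ++ pvRowF M C R (R.toNat - 2 - k) :: S' with hbdef
    have hkk : ((k : Int)).toNat = k := by omega
    have hblen : b.length = R.toNat := by
      simp [hbdef, hS']
      omega
    have hgi : PySem.List.pyGetD b (k : Int) [] = z := by
      rw [PySem.List.pyGetD_of_nonneg _ _ (by omega), hkk, hbdef, List.getD,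
        List.getElem?_append_left (by simp)]
      simp
    have hgi1 : PySem.List.pyGetD b ((k : Int) + 1) []
        = pvRowF M C R (R.toNat - 2 - k) := by
      rw [PySem.List.pyGetD_of_nonneg _ _ (by omega),
        show ((k : Int) + 1).toNat = k + 1 by omega, hbdef, List.getD,
        List.getElem?_append_right (by simp)]
      simp
    rw [astep_eq M C b (k : Int) (by omega) (by omega)
      (by rw [hgi, hz]; simp), hgi1]
    have hrowstep :
        pvRow (PySem.List.pyGetD M ((k : Int) + 1) []) (pvRowF M C R (R.toNat - 2 - k)) C
        = pvRowF M C R (R.toNat - 1 - k) := by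
      rw [show R.toNat - 1 - k = (R.toNat - 2 - k) + 1 by omega]
      simp only [pvRowF]
      rw [show R - 1 - ((R.toNat - 2 - k : Nat) : Int) = (k : Int) + 1 by omega]
    rw [hrowstep]
    have hset : PySem.List.pySetD b (k : Int) (pvRowF M C R (R.toNat - 1 - k))
        = List.replicate k z
          ++ (List.range (R.toNat - k)).map (fun t => pvRowF M C R (R.toNat - 1 - k - t)) := by
      rw [PySem.List.pySetD_of_nonneg _ _ (by omega), hkk, hbdef,
        List.replicate_succ' (n := k), List.append_assoc,
        List.set_append_right _ _ (by simp)]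
      congr 1
      rw [show k - (List.replicate k z).length = 0 by simp, List.singleton_append,
        List.set_cons_zero]
      rw [show R.toNat - k = n + 1 by omega, List.range_succ_eq_map, List.map_cons,
        List.map_map, show R.toNat - 1 - k - 0 = R.toNat - 1 - k by omega]
      congr 1
      rw [← hS]
      apply List.map_congr_left
      intro t _
      simp only [Function.comp]
      rw [show R.toNat - 1 - (k + 1) - t = R.toNat - 1 - k - Nat.succ t by omega]
    rw [hset]
    exact ih (by omega)

lemma createBottom_eq_rows (M : List (List Int)) (R : Int) (C : Int) :
    createBottom M R C = (List.range R.toNat).map (fun t => pvRowF M C R (R.toNat - 1 - t)) := by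
  unfold createBottom
  have hin : (PySem.List.pyRange 0 C 1).map (fun _ => (0 : Int))
      = List.replicate C.toNat (0 : Int) := by
    rw [List.map_const']
    simp [PySem.List.length_pyRange_one]
  have hb0 : (PySem.List.pyRange 0 R 1).map (fun _ =>
        (PySem.List.pyRange 0 C 1).map (fun _ => (0 : Int)))
      = List.replicate R.toNat (List.replicate C.toNat (0 : Int)) := by
    rw [hin, List.map_const']
    simp [PySem.List.length_pyRange_one]
  rw [hb0]
  by_cases hR : R ≤ 0
  · rw [PySem.List.pyRange_neg_one_eq_nil (by omega : R - 2 ≤ -1)]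
    simp [Int.toNat_of_nonpos hR]
  · have hgrid : List.replicate R.toNat (List.replicate C.toNat (0 : Int))
        = List.replicate (R.toNat - 1) (List.replicate C.toNat (0 : Int))
          ++ (List.range (R.toNat - (R.toNat - 1))).map
              (fun t => pvRowF M C R (R.toNat - 1 - (R.toNat - 1) - t)) := by
      rw [show R.toNat - (R.toNat - 1) = 1 by omega, List.range_one, List.map_singleton,
        show R.toNat - 1 - (R.toNat - 1) - 0 = 0 by omega,
        show pvRowF M C R 0 = List.replicate C.toNat (0 : Int) from rfl,
        ← List.replicate_succ', show R.toNat - 1 + 1 = R.toNat by omega]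
    rw [hgrid, show R - 2 = ((R.toNat - 1 : Nat) : Int) - 1 by omega]
    exact loop_A M C R (R.toNat - 1) (by omega)

-- B's inner per-column loop: positions 0..s-1 get their pvVal values, back to front
lemma loop_B (M : List (List Int)) (R : Int) (j : Int) :
    ∀ (s : Nat) (col : List Int) (run : Int), (s : Int) ≤ R - 1 → s ≤ col.length →
    run = pvVal M R j (R - 1 - (s : Int)).toNat →
    ((PySem.List.pyRange (s : Int) 0 (-1)).foldl
      (fun (st : List Int × Int) i =>
        let run : Int :=
          if PySem.List.pyGetD (PySem.List.pyGetD M i []) j 0 ≠ 0 then st.2 + 1 else 0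
        (PySem.List.pySetD st.1 (i - 1) run, run))
      (col, run)).1
      = (List.range s).map (fun (t : Nat) => pvVal M R j (R - 1 - (t : Int)).toNat) ++ col.drop s := by
  intro s
  induction s with
  | zero =>
    intro col run _ _ _
    rw [show ((0 : Nat) : Int) = 0 by norm_num, PySem.List.pyRange_neg_one_eq_nil le_rfl]
    simp
  | succ s ih =>
    intro col run hs hcol hrun
    have hcast : ((s + 1 : Nat) : Int) = (s : Int) + 1 := by push_cast; ring
    rw [hcast] at hrun
    rw [hcast, PySem.List.pyRange_neg_one_cons (by omega : (0 : Int) < (s : Int) + 1),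
      List.foldl_cons]
    have hrun' :
        (if PySem.List.pyGetD (PySem.List.pyGetD M ((s : Int) + 1) []) j 0 ≠ 0
          then run + 1 else 0)
        = pvVal M R j (R - 1 - (s : Int)).toNat := by
      have hm : (R - 1 - (s : Int)).toNat = (R - 1 - ((s : Int) + 1)).toNat + 1 := by omega
      rw [hm]
      simp only [pvVal]
      have hidx : R - 1 - (((R - 1 - ((s : Int) + 1)).toNat : Int)) = (s : Int) + 1 := by omega
      rw [hidx, ← hrun]
      by_cases h : PySem.List.pyGetD (PySem.List.pyGetD M ((s : Int) + 1) []) j 0 = 0 <;>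
        simp [h]
    rw [show (s : Int) + 1 - 1 = ((s : Nat) : Int) by ring]
    rw [hrun']
    simp only [PySem.List.pySetD_natCast]
    rw [ih (col.set s (pvVal M R j (R - 1 - (s : Int)).toNat))
        (pvVal M R j (R - 1 - (s : Int)).toNat) (by omega) (by simp; omega) rfl]
    have hdrop : (col.set s (pvVal M R j (R - 1 - (s : Int)).toNat)).drop s
        = pvVal M R j (R - 1 - (s : Int)).toNat :: col.drop (s + 1) := by
      have hlt : s < (col.set s (pvVal M R j (R - 1 - (s : Int)).toNat)).length := by
        simp; omega
      rw [List.drop_eq_getElem_cons hlt]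
      rw [List.getElem_set_self (by omega)]
      congr 1
      ext k x
      simp only [List.getElem?_drop, List.getElem?_set]
      rw [if_neg (by omega)]
    rw [hdrop]
    simp [List.range_succ]

lemma createBottom_alt_eq_rows (M : List (List Int)) (R : Int) (C : Int) :
    createBottom_alt M R C = (List.range R.toNat).map (fun t => pvRowF M C R (R.toNat - 1 - t)) := by
  simp only [createBottom_alt]
  by_cases hR0 : R ≤ 0
  · rw [if_pos hR0]
    simp [Int.toNat_of_nonpos hR0]
  rw [if_neg hR0]
  have hcol : ∀ j : Int,
      ((PySem.List.pyRange (R - 1) 0 (-1)).foldl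
        (fun (st : List Int × Int) i =>
          let run : Int :=
            if PySem.List.pyGetD (PySem.List.pyGetD M i []) j 0 ≠ 0 then st.2 + 1 else 0
          (PySem.List.pySetD st.1 (i - 1) run, run))
        (List.replicate R.toNat (0 : Int), 0)).1
      = (List.range R.toNat).map (fun (t : Nat) => pvVal M R j (R - 1 - (t : Int)).toNat) := by
    intro j
    by_cases hR : R ≤ 0
    · rw [PySem.List.pyRange_neg_one_eq_nil (by omega : R - 1 ≤ 0)]
      simp [Int.toNat_of_nonpos hR]
    · have hB := loop_B M R j (R.toNat - 1) (List.replicate R.toNat (0 : Int)) 0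
        (by omega) (by simp)
        (by rw [show (R - 1 - ((R.toNat - 1 : Nat) : Int)).toNat = 0 by omega]; rfl)
      rw [show ((R.toNat - 1 : Nat) : Int) = R - 1 by omega] at hB
      rw [hB, List.drop_replicate, show R.toNat - (R.toNat - 1) = 1 by omega]
      conv_rhs => rw [show R.toNat = (R.toNat - 1) + 1 by omega]
      rw [List.range_succ, List.map_append, List.map_singleton,
        show (R - 1 - ((R.toNat - 1 : Nat) : Int)).toNat = 0 by omega]
      rfl
  apply List.ext_getElem
  · simp [PySem.List.length_pyRange_one]
  intro t h1 h2
  rw [List.getElem_map, List.getElem_map, PySem.List.getElem_pyRange_one, rowF_eq]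
  have ht : t < R.toNat := by
    simpa [PySem.List.length_pyRange_one] using h1
  apply List.map_congr_left
  intro j hj
  obtain ⟨hj0, hjC⟩ := (PySem.List.mem_pyRange_one).mp hj
  rw [PySem.List.pyGetD_map_pyRange_of_nonneg _ _ _ _ hj0 hjC, hcol j]
  rw [show (0 : Int) + (t : Int) = ((t : Nat) : Int) by ring,
    PySem.List.pyGetD_natCast]
  rw [List.getD_eq_getElem?_getD, List.getElem?_map, List.getElem?_range ht]
  simp only [Option.map_some, Option.getD_some]
  rw [show (R - 1 - (t : Int)).toNat = R.toNat - 1 - t by omega, List.getElem_range]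

-- ===== VERDICT (by name: the statement is the Claim_ definition above) =====
theorem createBottom_spec : Claim_equal_createBottom := by
  intro M R C _ _
  unfold Spec_createBottom
  rw [createBottom_eq_rows, createBottom_alt_eq_rows]
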